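-- pv_equiv track=rewrite | github.com/arpi-r/NumberTheory-Cryptography-Assignments | PrimeFactorization.py | fermatprimalitytest
-- ===== SOURCE A (Python) =====
-- def sqmul(a,x,n):
--     x=bin(x)
--     x=list(x)
--     x=x[2:]
--     y=1
--     for i in range(len(x)-1,-1,-1):
--         if int(x[i])==1:
--             y=(a*y)%n
--         a=(a*a)%n
--     return y
--
-- def fermatprimalitytest(p):
--     prime=True
--     for i in [2,3,5,7,11]:
--         if i>=p:
--             break
--         if sqmul(i,p-1,p)==1:
--             continue
--         else:
--             prime=False
--             break
--     if p==1:
--     	return False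
--     return prime
-- ===== SOURCE B (Python) =====
-- def sqmul(a, x, n):
--     if x <= 0:
--         return 1
--     h = sqmul(a, x // 2, n)
--     h = (h * h) % n
--     if x % 2 == 1:
--         h = (h * a) % n
--     return h
--
-- def fermatprimalitytest(p):
--     prime = True
--     for i in [2, 3, 5, 7, 11]:
--         if i >= p:
--             break
--         if sqmul(i, p - 1, p) == 1:
--             continue
--         else:
--             prime = False
--             break
--     if p == 1:
--         return False
--     return prime
-- ===== Notes on version B (the rewrite author's own statement) =====
-- stated objective: alternative
-- what changed: The modular exponentiation helper sqmul is rewritten from an iterative loop over the binary-string digits of the exponent (bin/list/index loop) into a recursive divide-and-conquer on the halved exponent; the Fermat base loop is unchanged.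
import Mathlib
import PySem

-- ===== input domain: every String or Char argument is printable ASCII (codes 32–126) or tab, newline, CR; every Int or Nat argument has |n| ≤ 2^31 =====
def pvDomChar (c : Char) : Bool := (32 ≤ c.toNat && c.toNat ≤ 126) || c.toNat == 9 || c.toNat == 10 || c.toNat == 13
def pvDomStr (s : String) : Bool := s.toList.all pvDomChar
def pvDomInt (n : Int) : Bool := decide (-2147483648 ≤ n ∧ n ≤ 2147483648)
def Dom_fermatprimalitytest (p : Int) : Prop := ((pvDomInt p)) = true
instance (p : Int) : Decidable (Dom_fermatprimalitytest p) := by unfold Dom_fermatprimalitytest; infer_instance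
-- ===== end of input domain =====

-- B rewrites the modular-exponentiation helper from A's iterative loop over the
-- binary-string digits of the exponent into recursive halving of the exponent;
-- the Fermat base loop is unchanged.  Objective: alternative decomposition.

-- ===== PORT A =====
-- bin(x) for x ≥ 0, digits as Ints, LSB first (Python's bin gives MSB first;
-- A's loop walks it from the last index down, i.e. LSB first, so we port the
-- digit list LSB first and fold left over it).
def pvBitsRev (m : Nat) : List Int :=
  if m = 0 then [] else (m % 2 : Nat) :: pvBitsRev (m / 2)

-- the LSB-first digit list A's loop actually traverses (bin(0) = "0b0" → ['0'])
def pvDigits (x : Int) : List Int :=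
  if x = 0 then [0] else pvBitsRev x.toNat

-- A's loop body: per digit, if digit == 1 then y := (a*y) % n; a := (a*a) % n
def sqmulA_loop (bs : List Int) (a y n : Int) : Int :=
  match bs with
  | [] => y
  | b :: rest =>
      sqmulA_loop rest (PySem.Int.mod (a * a) n)
        (if b = 1 then PySem.Int.mod (a * y) n else y) n

def sqmulA (a x n : Int) : Int := sqmulA_loop (pvDigits x) a 1 n

def fermatA_loop (p : Int) : List Int → Bool
  | [] => true
  | i :: rest =>
      if i ≥ p then true
      else if sqmulA i (p - 1) p = 1 then fermatA_loop p rest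
      else false

def fermatprimalitytest (p : Int) : Bool :=
  let prime := fermatA_loop p [2, 3, 5, 7, 11]
  if p = 1 then false else prime

-- ===== PORT B =====
-- recursive square-and-multiply: Source B's sqmul, step for step
def sqmulB (a x n : Int) : Int :=
  if x ≤ 0 then 1
  else
    let h := sqmulB a (PySem.Int.floordiv x 2) n
    let h := PySem.Int.mod (h * h) n
    if PySem.Int.mod x 2 = 1 then PySem.Int.mod (h * a) n else h
termination_by x.toNat
decreasing_by
  simp only [PySem.Int.floordiv_eq_ediv_of_pos (a := x) (by omega : (0:Int) < 2)]
  omega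

def fermatB_loop (p : Int) : List Int → Bool
  | [] => true
  | i :: rest =>
      if i ≥ p then true
      else if sqmulB i (p - 1) p = 1 then fermatB_loop p rest
      else false

def fermatprimalitytest_alt (p : Int) : Bool :=
  let prime := fermatB_loop p [2, 3, 5, 7, 11]
  if p = 1 then false else prime

-- ===== PRECONDITION & SPEC =====
def Spec_fermatprimalitytest (p : Int) (out : Bool) : Prop := out = fermatprimalitytest_alt p
instance (p : Int) (out : Bool) : Decidable (Spec_fermatprimalitytest p out) := by unfold Spec_fermatprimalitytest; infer_instance

-- ===== CLAIM (what is proved, stated in full; the proofs are below) =====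
def Claim_equal_fermatprimalitytest : Prop := ∀ (p : Int), Dom_fermatprimalitytest p → Spec_fermatprimalitytest p (fermatprimalitytest p)

-- ===== LEMMAS AND PROOFS =====

-- value of an LSB-first digit list
def pvValRev : List Int → Nat
  | [] => 0
  | b :: rest => b.toNat + 2 * pvValRev rest

lemma pvValRev_bitsRev (m : Nat) : pvValRev (pvBitsRev m) = m := by
  induction m using Nat.strong_induction_on with
  | _ m ih =>
    rw [pvBitsRev]
    by_cases h : m = 0
    · simp [h, pvValRev]
    · simp only [h, if_false, pvValRev, ih (m / 2) (by omega)]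
      omega

lemma mod_emod (a n : Int) (hn : 0 < n) : PySem.Int.mod a n = a % n :=
  PySem.Int.mod_eq_emod_of_pos hn

-- loop invariant for A's fold: with y already reduced, it computes y*a^val mod n
lemma pv_one_emod (n : Int) (hn : 1 < n) : (1 : Int) % n = 1 :=
  Int.emod_eq_of_lt (by omega) (by omega)

lemma pv_pow_emod (c n : Int) (k : Nat) : (c % n) ^ k % n = c ^ k % n :=
  Int.ModEq.pow k (Int.emod_emod_of_dvd c dvd_rfl)

lemma pvBitsRev_digits (m : Nat) : ∀ b ∈ pvBitsRev m, b = 0 ∨ b = 1 := by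
  induction m using Nat.strong_induction_on with
  | _ m ih =>
    rw [pvBitsRev]
    by_cases h : m = 0
    · simp [h]
    · simp only [h, if_false, List.mem_cons]
      rintro b (rfl | hb)
      · omega
      · exact ih (m / 2) (by omega) b hb

lemma sqmulA_loop_eq (bs : List Int) (a y n : Int) (hn : 1 < n)
    (hy : y % n = y) (hb01 : ∀ b ∈ bs, b = 0 ∨ b = 1) :
    sqmulA_loop bs a y n = (y * a ^ pvValRev bs) % n := by
  induction bs generalizing a y with
  | nil => simp [sqmulA_loop, pvValRev, hy]
  | cons b rest ih =>
    have ih' := fun a y hy => ih a y hy (fun c hc => hb01 c (List.mem_cons_of_mem _ hc))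
    rw [sqmulA_loop, pvValRev]
    rcases hb01 b (List.mem_cons_self ..) with rfl | rfl
    · rw [if_neg (by decide), mod_emod _ _ (by omega : (0:Int) < n), ih' _ _ hy]
      calc (y * ((a * a) % n) ^ pvValRev rest) % n
          = (y % n * (((a*a) % n) ^ pvValRev rest % n)) % n := by
            rw [← Int.mul_emod]
        _ = (y % n * ((a*a) ^ pvValRev rest % n)) % n := by rw [pv_pow_emod]
        _ = (y * (a*a) ^ pvValRev rest) % n := by rw [← Int.mul_emod]
        _ = (y * a ^ ((0:Int).toNat + 2 * pvValRev rest)) % n := by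
            show _ = (y * a ^ (0 + 2 * pvValRev rest)) % n
            ring_nf
    · rw [if_pos rfl, mod_emod _ _ (by omega : (0:Int) < n),
          mod_emod _ _ (by omega : (0:Int) < n),
          ih' _ _ (Int.emod_emod_of_dvd _ dvd_rfl)]
      calc (a * y % n * ((a * a) % n) ^ pvValRev rest) % n
          = (a * y % n % n * (((a*a) % n) ^ pvValRev rest % n)) % n := by
            rw [← Int.mul_emod]
        _ = (a * y % n * ((a*a) ^ pvValRev rest % n)) % n := by
            rw [Int.emod_emod_of_dvd _ dvd_rfl, pv_pow_emod]
        _ = (a * y * (a*a) ^ pvValRev rest) % n := by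
            rw [← Int.mul_emod]
        _ = (y * a ^ ((1:Int).toNat + 2 * pvValRev rest)) % n := by
            show _ = (y * a ^ (1 + 2 * pvValRev rest)) % n
            ring_nf

lemma sqmulA_eq_pow (a x n : Int) (hx : 0 ≤ x) (hn : 1 < n) :
    sqmulA a x n = a ^ x.toNat % n := by
  rw [sqmulA]
  by_cases h0 : x = 0
  · subst h0
    rw [show pvDigits (0:Int) = [0] from rfl, sqmulA_loop, if_neg (by decide),
        sqmulA_loop]
    simpa using (pv_one_emod n hn).symm
  · rw [pvDigits, if_neg h0, sqmulA_loop_eq _ _ _ _ hn (pv_one_emod n hn)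
          (pvBitsRev_digits x.toNat),
        pvValRev_bitsRev, one_mul]

lemma sqmulB_eq_pow (a x n : Int) (hx : 0 ≤ x) (hn : 1 < n) :
    sqmulB a x n = a ^ x.toNat % n := by
  generalize hk : x.toNat = k
  induction k using Nat.strong_induction_on generalizing x with
  | _ k ih =>
    rw [sqmulB]
    by_cases h0 : x ≤ 0
    · have hx0 : x = 0 := le_antisymm h0 hx
      subst hx0
      simp only [if_pos le_rfl, ← hk, Int.toNat_zero, pow_zero]
      exact (pv_one_emod n hn).symm
    · have hfd : PySem.Int.floordiv x 2 = x / 2 :=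
        PySem.Int.floordiv_eq_ediv_of_pos (by omega)
      rw [if_neg h0]
      simp only [hfd, ih (x / 2).toNat (by omega) (x / 2) (by omega) rfl,
          mod_emod _ _ (by omega : (0:Int) < 2),
          mod_emod _ _ (by omega : (0:Int) < n)]
      have hsq : (a ^ (x / 2).toNat % n * (a ^ (x / 2).toNat % n)) % n
          = a ^ ((x / 2).toNat + (x / 2).toNat) % n := by
        rw [Int.mul_emod, Int.emod_emod_of_dvd _ dvd_rfl, ← Int.mul_emod, pow_add]
      by_cases hodd : x % 2 = 1
      · rw [if_pos hodd, hsq, Int.mul_emod, Int.emod_emod_of_dvd _ dvd_rfl,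
            ← Int.mul_emod, ← pow_succ]
        congr 2
        omega
      · rw [if_neg hodd, hsq]
        congr 2
        omega

lemma sqmul_eq (a x n : Int) (hx : 0 ≤ x) (hn : 1 < n) :
    sqmulA a x n = sqmulB a x n := by
  rw [sqmulA_eq_pow a x n hx hn, sqmulB_eq_pow a x n hx hn]

lemma loop_eq (p : Int) (l : List Int) (hl : ∀ i ∈ l, 2 ≤ i) :
    fermatA_loop p l = fermatB_loop p l := by
  induction l with
  | nil => rfl
  | cons i rest ih =>
    rw [fermatA_loop, fermatB_loop]
    by_cases hip : i ≥ p
    · simp [hip]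
    · have h2 : 2 ≤ i := hl i (List.mem_cons_self ..)
      rw [if_neg hip, if_neg hip,
          sqmul_eq i (p - 1) p (by omega) (by omega),
          ih (fun j hj => hl j (List.mem_cons_of_mem _ hj))]

-- ===== VERDICT (by name: the statement is the Claim_ definition above) =====
theorem fermatprimalitytest_spec : Claim_equal_fermatprimalitytest := by
  intro p _
  unfold Spec_fermatprimalitytest fermatprimalitytest fermatprimalitytest_alt
  rw [loop_eq p _ (by decide)]
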